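-- pv_equiv track=rewrite | github.com/ermmy-coder/Hete_MESE-python | Hete_MESE.py | find_path_instances
-- ===== SOURCE A (Python) =====
-- TYPE_MAPPING = {
--     'author': 'A',
--     'paper': 'P',
--     'venue': 'V',
--     'writes': 'P',    # 作者→论文的边类型映射为P
--     'be_writen':'A',
--     'cited_in':'→P',
--     'cites' : 'P←',
--     'published_in': 'V',  # 论文→会议的边类型映射为V
--     'publish' : 'P',
--     'has_keyword' : 'K',
--     'keyword_in' : 'P'
-- }
--
-- def find_path_instances(u, v, meta_path, graph):
--     """严格实现元路径实例查找"""
--     path_types = meta_path.replace('←', '-←').replace('→', '-→').split('-')  #处理含有箭头的元路径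
--     instances = []
--
--     def dfs(current, path, remaining_types): #DFS深度优先搜索算法查找实例
--             if len(remaining_types) == 0:
--                 if current == v:
--                     instances.append(path)
--                 return
--             rel_type= remaining_types[0]
--
--             for edge in graph['edges']:
--                 if rel_type == '→P' and edge[0] == current and TYPE_MAPPING[edge[2]] == rel_type:
--                     dfs(edge[1], path + [edge], remaining_types[1:])
--                 elif rel_type == 'P←' and edge[1] == current and TYPE_MAPPING[edge[2]] == rel_type:
--                     dfs(edge[0], path + [edge], remaining_types[1:])
--                 elif edge[0] == current and TYPE_MAPPING[edge[2]] == rel_type:  #映射边的类型和元路径节点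
--                     dfs(edge[1], path + [edge], remaining_types[1:])
--
--     dfs(u, [], path_types[1:])  # 第一个类型已由u确定
--     return instances
-- ===== SOURCE B (Python) =====
-- TYPE_MAPPING = {
--     'author': 'A',
--     'paper': 'P',
--     'venue': 'V',
--     'writes': 'P',
--     'be_writen': 'A',
--     'cited_in': '→P',
--     'cites': 'P←',
--     'published_in': 'V',
--     'publish': 'P',
--     'has_keyword': 'K',
--     'keyword_in': 'P'
-- }
--
-- def find_path_instances(u, v, meta_path, graph):
--     """Iterative level-by-level frontier expansion instead of recursive DFS."""
--     path_types = meta_path.replace('←', '-←').replace('→', '-→').split('-')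
--     frontier = [(u, [])]
--     for rel_type in path_types[1:]:
--         nxt = []
--         for current, path in frontier:
--             for edge in graph['edges']:
--                 if rel_type == '→P' and edge[0] == current and TYPE_MAPPING[edge[2]] == rel_type:
--                     nxt.append((edge[1], path + [edge]))
--                 elif rel_type == 'P←' and edge[1] == current and TYPE_MAPPING[edge[2]] == rel_type:
--                     nxt.append((edge[0], path + [edge]))
--                 elif edge[0] == current and TYPE_MAPPING[edge[2]] == rel_type:
--                     nxt.append((edge[1], path + [edge]))
--         frontier = nxt
--     return [path for current, path in frontier if current == v]
-- ===== Notes on version B (the rewrite author's own statement) =====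
-- stated objective: alternative
-- what changed: Replaces the recursive DFS with nested closure and list mutation by an iterative level-by-level frontier expansion: for each relation type a new frontier of (node, partial path) pairs is built by scanning the edge list, and the answer is filtered from the final frontier; frontier-order x edge-order reproduces the DFS preorder exactly.
-- outside the precondition, e.g. on find_path_instances('a', 'b', 'A-P', {'edges': [('x', 'y', 'weird')]}): A returns [], B returns []
import Mathlib
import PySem

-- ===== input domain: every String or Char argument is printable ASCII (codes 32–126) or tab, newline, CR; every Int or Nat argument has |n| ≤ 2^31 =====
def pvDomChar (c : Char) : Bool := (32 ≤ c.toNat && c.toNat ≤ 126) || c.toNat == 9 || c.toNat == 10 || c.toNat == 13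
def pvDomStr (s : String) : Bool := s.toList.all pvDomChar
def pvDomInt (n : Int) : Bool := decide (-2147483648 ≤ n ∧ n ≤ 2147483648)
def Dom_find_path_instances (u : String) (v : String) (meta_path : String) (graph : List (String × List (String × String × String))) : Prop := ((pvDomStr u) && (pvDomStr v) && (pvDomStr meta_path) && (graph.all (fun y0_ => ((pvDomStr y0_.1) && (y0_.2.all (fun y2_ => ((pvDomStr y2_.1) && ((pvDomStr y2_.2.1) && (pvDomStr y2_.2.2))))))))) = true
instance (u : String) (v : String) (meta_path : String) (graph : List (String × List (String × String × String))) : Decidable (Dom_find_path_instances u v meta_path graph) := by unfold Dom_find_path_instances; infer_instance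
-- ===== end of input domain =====

-- B replaces A's recursive DFS by an iterative per-relation frontier expansion (objective: alternative decomposition, same cost).

-- ===== PORT A =====
-- the module-level TYPE_MAPPING dict (shared, like the Python module constant)
def TYPE_MAPPING : PySem.Dict String String := PySem.Dict.ofList
  [("author", "A"), ("paper", "P"), ("venue", "V"), ("writes", "P"), ("be_writen", "A"),
   ("cited_in", "→P"), ("cites", "P←"), ("published_in", "V"), ("publish", "P"),
   ("has_keyword", "K"), ("keyword_in", "P")]

-- path_types = meta_path.replace('←','-←').replace('→','-→').split('-')  (split on a nonempty separator)
def pvPathTypes (meta_path : String) : List String :=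
  -- split('-'): separator "-" ≠ "", so split? is always `some`
  (PySem.Str.split? (PySem.Str.replace (PySem.Str.replace meta_path "←" "-←") "→" "-→") "-").getD []

-- A's inner `dfs`, returning the list of completed paths in call order instead of
-- mutating `instances`; `TYPE_MAPPING[edge[2]] == rel` is `get? … = some rel`
-- (the `none` case — Python's KeyError — is excluded by Pre_).
def pvDfs (v : String) (edges : List (String × String × String)) :
    String → List (String × String × String) → List String → List (List (String × String × String))
  | current, path, [] => if current = v then [path] else []
  | current, path, rel :: rest =>
      edges.foldl (fun acc edge =>
        if rel = "→P" ∧ edge.1 = current ∧ TYPE_MAPPING.get? edge.2.2 = some rel then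
          acc ++ pvDfs v edges edge.2.1 (path ++ [edge]) rest
        else if rel = "P←" ∧ edge.2.1 = current ∧ TYPE_MAPPING.get? edge.2.2 = some rel then
          acc ++ pvDfs v edges edge.1 (path ++ [edge]) rest
        else if edge.1 = current ∧ TYPE_MAPPING.get? edge.2.2 = some rel then
          acc ++ pvDfs v edges edge.2.1 (path ++ [edge]) rest
        else acc) []

def find_path_instances (u : String) (v : String) (meta_path : String) (graph : List (String × List (String × String × String))) : List (List (String × String × String)) :=
  let path_types := pvPathTypes meta_path
  -- graph['edges']: first-match dict lookup; none = KeyError, excluded by Pre_ whenever it is reached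
  let edges := ((PySem.Dict.mk graph).get? "edges").getD []
  pvDfs v edges u [] (path_types.drop 1)   -- path_types[1:] = drop 1 (nonnegative slice)

-- ===== PORT B =====
-- one pass of Source B's middle loop: expand every (current, path) of the frontier by every matching edge
def pvStep (edges : List (String × String × String)) (rel : String)
    (frontier : List (String × List (String × String × String))) :
    List (String × List (String × String × String)) :=
  frontier.foldl (fun nxt cp =>
    edges.foldl (fun nxt edge =>
      if rel = "→P" ∧ edge.1 = cp.1 ∧ TYPE_MAPPING.get? edge.2.2 = some rel then
        nxt ++ [(edge.2.1, cp.2 ++ [edge])]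
      else if rel = "P←" ∧ edge.2.1 = cp.1 ∧ TYPE_MAPPING.get? edge.2.2 = some rel then
        nxt ++ [(edge.1, cp.2 ++ [edge])]
      else if edge.1 = cp.1 ∧ TYPE_MAPPING.get? edge.2.2 = some rel then
        nxt ++ [(edge.2.1, cp.2 ++ [edge])]
      else nxt) nxt) []

def find_path_instances_alt (u : String) (v : String) (meta_path : String) (graph : List (String × List (String × String × String))) : List (List (String × String × String)) :=
  let path_types := pvPathTypes meta_path
  let edges := ((PySem.Dict.mk graph).get? "edges").getD []
  let frontier := (path_types.drop 1).foldl (fun frontier rel => pvStep edges rel frontier) [(u, [])]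
  frontier.filterMap (fun cp => if cp.1 = v then some cp.2 else none)

-- ===== PRECONDITION & SPEC =====
-- Pre_ excludes the inputs where Python A raises KeyError (missing 'edges' key, or an edge type
-- absent from TYPE_MAPPING) when more than one path type is present; this over-excludes some inputs
-- on which A still returns (an unmapped edge whose endpoints never match the current node is never
-- looked up), where B returns the same value anyway — see the cites.
def Pre_find_path_instances (u : String) (v : String) (meta_path : String) (graph : List (String × List (String × String × String))) : Prop :=
  (pvPathTypes meta_path).drop 1 ≠ [] →
    (((PySem.Dict.mk graph).get? "edges").isSome = true ∧
     ∀ e ∈ (((PySem.Dict.mk graph).get? "edges").getD []), (TYPE_MAPPING.get? e.2.2).isSome = true)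
instance (u : String) (v : String) (meta_path : String) (graph : List (String × List (String × String × String))) : Decidable (Pre_find_path_instances u v meta_path graph) := by unfold Pre_find_path_instances; infer_instance

def pvWitness_find_path_instances : String × String × String × (List (String × List (String × String × String))) :=
  ("alice", "p1", "A-P", [("edges", [("alice", "p1", "writes")])])

def Spec_find_path_instances (u : String) (v : String) (meta_path : String) (graph : List (String × List (String × String × String))) (out : List (List (String × String × String))) : Prop := out = find_path_instances_alt u v meta_path graph
instance (u : String) (v : String) (meta_path : String) (graph : List (String × List (String × String × String))) (out : List (List (String × String × String))) : Decidable (Spec_find_path_instances u v meta_path graph out) := by unfold Spec_find_path_instances; infer_instance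

-- ===== CLAIM (what is proved, stated in full; the proofs are below) =====
def Claim_equal_find_path_instances : Prop := ∀ (u : String) (v : String) (meta_path : String) (graph : List (String × List (String × String × String))), Dom_find_path_instances u v meta_path graph → Pre_find_path_instances u v meta_path graph → Spec_find_path_instances u v meta_path graph (find_path_instances u v meta_path graph)

-- ===== LEMMAS AND PROOFS =====

-- the per-edge expansion rule both programs share, in list form ([] = no match)
def pvSel (rel current : String) (path : List (String × String × String))
    (edge : String × String × String) : List (String × List (String × String × String)) :=
  if rel = "→P" ∧ edge.1 = current ∧ TYPE_MAPPING.get? edge.2.2 = some rel then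
    [(edge.2.1, path ++ [edge])]
  else if rel = "P←" ∧ edge.2.1 = current ∧ TYPE_MAPPING.get? edge.2.2 = some rel then
    [(edge.1, path ++ [edge])]
  else if edge.1 = current ∧ TYPE_MAPPING.get? edge.2.2 = some rel then
    [(edge.2.1, path ++ [edge])]
  else []

lemma pvStep_inner (edges : List (String × String × String)) (rel : String)
    (cp : String × List (String × String × String)) (acc : List (String × List (String × String × String))) :
    edges.foldl (fun nxt edge =>
      if rel = "→P" ∧ edge.1 = cp.1 ∧ TYPE_MAPPING.get? edge.2.2 = some rel then
        nxt ++ [(edge.2.1, cp.2 ++ [edge])]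
      else if rel = "P←" ∧ edge.2.1 = cp.1 ∧ TYPE_MAPPING.get? edge.2.2 = some rel then
        nxt ++ [(edge.1, cp.2 ++ [edge])]
      else if edge.1 = cp.1 ∧ TYPE_MAPPING.get? edge.2.2 = some rel then
        nxt ++ [(edge.2.1, cp.2 ++ [edge])]
      else nxt) acc = acc ++ edges.flatMap (pvSel rel cp.1 cp.2) := by
  have h : (fun (nxt : List (String × List (String × String × String))) edge =>
      if rel = "→P" ∧ edge.1 = cp.1 ∧ TYPE_MAPPING.get? edge.2.2 = some rel then
        nxt ++ [(edge.2.1, cp.2 ++ [edge])]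
      else if rel = "P←" ∧ edge.2.1 = cp.1 ∧ TYPE_MAPPING.get? edge.2.2 = some rel then
        nxt ++ [(edge.1, cp.2 ++ [edge])]
      else if edge.1 = cp.1 ∧ TYPE_MAPPING.get? edge.2.2 = some rel then
        nxt ++ [(edge.2.1, cp.2 ++ [edge])]
      else nxt)
      = fun nxt edge => nxt ++ pvSel rel cp.1 cp.2 edge := by
    funext nxt edge
    simp only [pvSel]
    split_ifs <;> simp
  rw [h, PySem.List.foldl_append_eq_flatMap]

lemma pvStep_eq_flatMap (edges : List (String × String × String)) (rel : String)
    (frontier : List (String × List (String × String × String))) :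
    pvStep edges rel frontier = frontier.flatMap (fun cp => edges.flatMap (pvSel rel cp.1 cp.2)) := by
  suffices h : ∀ acc, frontier.foldl (fun nxt cp =>
      edges.foldl (fun nxt edge =>
        if rel = "→P" ∧ edge.1 = cp.1 ∧ TYPE_MAPPING.get? edge.2.2 = some rel then
          nxt ++ [(edge.2.1, cp.2 ++ [edge])]
        else if rel = "P←" ∧ edge.2.1 = cp.1 ∧ TYPE_MAPPING.get? edge.2.2 = some rel then
          nxt ++ [(edge.1, cp.2 ++ [edge])]
        else if edge.1 = cp.1 ∧ TYPE_MAPPING.get? edge.2.2 = some rel then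
          nxt ++ [(edge.2.1, cp.2 ++ [edge])]
        else nxt) nxt) acc
      = acc ++ frontier.flatMap (fun cp => edges.flatMap (pvSel rel cp.1 cp.2)) by
    simpa using h []
  induction frontier with
  | nil => intro acc; simp
  | cons cp fr ih =>
      intro acc
      simp only [List.foldl_cons, List.flatMap_cons, pvStep_inner]
      simp [List.flatMap_def, List.append_assoc]

lemma pvStep_append (edges : List (String × String × String)) (rel : String)
    (f1 f2 : List (String × List (String × String × String))) :
    pvStep edges rel (f1 ++ f2) = pvStep edges rel f1 ++ pvStep edges rel f2 := by
  simp [pvStep_eq_flatMap]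

lemma pvLevels_append (edges : List (String × String × String)) (rels : List String)
    (f1 f2 : List (String × List (String × String × String))) :
    rels.foldl (fun fr rel => pvStep edges rel fr) (f1 ++ f2)
      = rels.foldl (fun fr rel => pvStep edges rel fr) f1
        ++ rels.foldl (fun fr rel => pvStep edges rel fr) f2 := by
  induction rels generalizing f1 f2 with
  | nil => simp
  | cons rel rest ih => simp [List.foldl_cons, pvStep_append, ih]

lemma pvLevels_nil (edges : List (String × String × String)) (rels : List String) :
    rels.foldl (fun fr rel => pvStep edges rel fr) [] = [] := by
  induction rels with
  | nil => rfl
  | cons rel rest ih => exact ih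

lemma pvFinal_levels_flatMap (v : String) (edges : List (String × String × String))
    (rels : List String) (fr : List (String × List (String × String × String))) :
    (rels.foldl (fun fr rel => pvStep edges rel fr) fr).filterMap
        (fun cp => if cp.1 = v then some cp.2 else none)
      = fr.flatMap (fun np =>
          (rels.foldl (fun fr rel => pvStep edges rel fr) [np]).filterMap
            (fun cp => if cp.1 = v then some cp.2 else none)) := by
  induction fr with
  | nil => simp [pvLevels_nil]
  | cons np fr ih =>
      have h : np :: fr = [np] ++ fr := rfl
      rw [h, pvLevels_append, List.filterMap_append, List.flatMap_append, ih]
      simp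

lemma pvFlatMap_assoc {α β γ : Type} (l : List α) (f : α → List β) (g : β → List γ) :
    (l.flatMap f).flatMap g = l.flatMap (fun x => (f x).flatMap g) := by
  induction l with
  | nil => rfl
  | cons x xs ih => simp [List.flatMap_cons, ih]

lemma pvDfs_eq_levels (v : String) (edges : List (String × String × String)) :
    ∀ (rels : List String) (current : String) (path : List (String × String × String)),
      pvDfs v edges current path rels
        = (rels.foldl (fun fr rel => pvStep edges rel fr) [(current, path)]).filterMap
            (fun cp => if cp.1 = v then some cp.2 else none) := by
  intro rels
  induction rels with
  | nil => intro current path; by_cases h : current = v <;> simp [pvDfs, h]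
  | cons rel rest ih =>
      intro current path
      have hbody : (fun (acc : List (List (String × String × String))) edge =>
          if rel = "→P" ∧ edge.1 = current ∧ TYPE_MAPPING.get? edge.2.2 = some rel then
            acc ++ pvDfs v edges edge.2.1 (path ++ [edge]) rest
          else if rel = "P←" ∧ edge.2.1 = current ∧ TYPE_MAPPING.get? edge.2.2 = some rel then
            acc ++ pvDfs v edges edge.1 (path ++ [edge]) rest
          else if edge.1 = current ∧ TYPE_MAPPING.get? edge.2.2 = some rel then
            acc ++ pvDfs v edges edge.2.1 (path ++ [edge]) rest
          else acc)
          = fun acc edge => acc ++ (pvSel rel current path edge).flatMap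
              (fun np => pvDfs v edges np.1 np.2 rest) := by
        funext acc edge
        simp only [pvSel]
        split_ifs <;> simp
      have hA : pvDfs v edges current path (rel :: rest)
          = edges.flatMap (fun edge => (pvSel rel current path edge).flatMap
              (fun np => pvDfs v edges np.1 np.2 rest)) := by
        show edges.foldl _ [] = _
        rw [hbody, PySem.List.foldl_append_eq_flatMap]
        simp
      rw [hA, List.foldl_cons]
      have hstep : pvStep edges rel [(current, path)] = edges.flatMap (pvSel rel current path) := by
        simp [pvStep_eq_flatMap]
      rw [hstep, pvFinal_levels_flatMap, pvFlatMap_assoc]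
      exact List.flatMap_congr (fun edge _ => List.flatMap_congr (fun np _ => ih np.1 np.2))

-- ===== VERDICT (by name: the statement is the Claim_ definition above) =====
theorem find_path_instances_spec : Claim_equal_find_path_instances := by
  intro u v meta_path graph _ _
  show find_path_instances u v meta_path graph = find_path_instances_alt u v meta_path graph
  simp only [find_path_instances, find_path_instances_alt]
  exact pvDfs_eq_levels v _ _ u []
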